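-- pv_equiv track=rewrite | github.com/zouhengchuan/mitaka | utility_scripts/prime.py | find_prime_q
-- ===== SOURCE A (Python) =====
-- def is_prime(num):
--     """ 判断一个数是否是素数 """
--     if num <= 1:
--         return False
--     if num <= 3:
--         return True
--     if num % 2 == 0 or num % 3 == 0:
--         return False
--     i = 5
--     while i * i <= num:
--         if num % i == 0 or num % (i + 2) == 0:
--             return False
--         i += 6
--     return True
--
-- def find_prime_q(n):
--     """ 查找最小的素数 q 使得 q - 1 能够被 n 整除 """
--     k = 1
--     L = []
--     while k<20:
--         candidate = k * n + 1
--         if is_prime(candidate):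
--             L.append(candidate)
--         k += 1
--     return L
-- ===== SOURCE B (Python) =====
-- def _passes(c, primes):
--     """c >= 2 is prime iff no sieve prime p with p*p <= c divides it."""
--     for p in primes:
--         if p * p > c:
--             break
--         if c % p == 0:
--             return False
--     return True
--
-- def find_prime_q(n):
--     cands = [k * n + 1 for k in range(1, 20)]
--     limit = max(cands)
--     if limit < 2:
--         return []
--     # isqrt(limit)
--     r = 1
--     while (r + 1) * (r + 1) <= limit:
--         r += 1
--     # simple sieve of Eratosthenes up to r, shared by all 19 candidates
--     flags = [True] * (r + 1)
--     for i in range(2, r + 1):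
--         for j in range(i * i, r + 1, i):
--             flags[j] = False
--     primes = [p for p in range(2, r + 1) if flags[p]]
--     return [c for c in cands if _passes(c, primes)]
-- ===== Notes on version B (the rewrite author's own statement) =====
-- stated objective: alternative
-- what changed: Replaces the per-candidate 6k±1-wheel trial division by a shared precomputed structure: one simple Sieve of Eratosthenes up to isqrt(max candidate) produces the prime trial divisors, and each candidate is then tested only against those sieve primes (break once p*p > c).
import Mathlib
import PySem

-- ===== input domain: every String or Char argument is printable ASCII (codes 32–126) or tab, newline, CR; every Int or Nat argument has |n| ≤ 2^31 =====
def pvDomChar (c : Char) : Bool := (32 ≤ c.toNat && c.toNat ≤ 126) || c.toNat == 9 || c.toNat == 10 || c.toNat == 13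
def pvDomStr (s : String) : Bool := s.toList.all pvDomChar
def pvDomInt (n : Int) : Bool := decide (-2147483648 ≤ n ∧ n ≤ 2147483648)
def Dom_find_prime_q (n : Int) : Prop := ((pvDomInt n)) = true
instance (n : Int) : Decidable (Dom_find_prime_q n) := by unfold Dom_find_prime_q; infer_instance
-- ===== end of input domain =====

-- B replaces A's per-candidate 6k±1-wheel trial division by one shared simple Sieve of
-- Eratosthenes up to isqrt(max candidate); each candidate is then trial-divided by the
-- sieve primes only (breaking once p*p > c). Same return value; not faster (alternative).
-- The Nat `fuel` parameters below are totality guards only (each loop provably terminates).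

-- ===== PORT A =====
-- while i * i <= num: if num % i == 0 or num % (i+2) == 0: return False; i += 6
def isPrimeLoopA (num : Int) : Nat → Int → Bool
  | 0, _ => true
  | fuel + 1, i =>
    if i * i ≤ num then
      if PySem.Int.mod num i == 0 || PySem.Int.mod num (i + 2) == 0 then false
      else isPrimeLoopA num fuel (i + 6)
    else true

def is_prime (num : Int) : Bool :=
  if num ≤ 1 then false
  else if num ≤ 3 then true
  else if PySem.Int.mod num 2 == 0 || PySem.Int.mod num 3 == 0 then false
  else isPrimeLoopA num (num - 5).toNat 5

-- while k < 20: candidate = k*n+1; if is_prime(candidate): L.append(candidate); k += 1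
def findLoopA (n : Int) : Nat → Int → List Int → List Int
  | 0, _, L => L
  | fuel + 1, k, L =>
    if k < 20 then
      let candidate := k * n + 1
      findLoopA n fuel (k + 1) (if is_prime candidate then L ++ [candidate] else L)
    else L

def find_prime_q (n : Int) : List Int := findLoopA n 19 1 []

-- ===== PORT B =====
-- r = 1; while (r+1)*(r+1) <= limit: r += 1
def isqrtLoopB (limit : Int) : Nat → Int → Int
  | 0, r => r
  | fuel + 1, r => if (r + 1) * (r + 1) ≤ limit then isqrtLoopB limit fuel (r + 1) else r

-- for j in range(i*i, r+1, i): flags[j] = False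
def sieveInnerB (r i : Int) (flags : List Bool) : List Bool :=
  (PySem.List.pyRange (i * i) (r + 1) i).foldl (fun fl j => fl.set j.toNat false) flags

-- flags = [True]*(r+1); for i in range(2, r+1): <inner loop>
def sieveB (r : Int) : List Bool :=
  (PySem.List.pyRange 2 (r + 1) 1).foldl (fun fl i => sieveInnerB r i fl)
    (List.replicate (r + 1).toNat true)

-- primes = [p for p in range(2, r+1) if flags[p]]
def sievePrimesB (r : Int) (flags : List Bool) : List Int :=
  (PySem.List.pyRange 2 (r + 1) 1).filter (fun p => flags.getD p.toNat false)

-- for p in primes: if p*p > c: break; if c % p == 0: return False; return True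
def passesB (c : Int) : List Int → Bool
  | [] => true
  | p :: ps =>
    if p * p > c then true
    else if PySem.Int.mod c p == 0 then false
    else passesB c ps

def find_prime_q_alt (n : Int) : List Int :=
  let cands := (PySem.List.pyRange 1 20 1).map (fun k => k * n + 1)
  match PySem.List.max? cands (fun x => x) with
  | none => []   -- unreachable: cands has 19 elements
  | some limit =>
    if limit < 2 then []
    else
      let r := isqrtLoopB limit (limit - 1).toNat 1
      let primes := sievePrimesB r (sieveB r)
      cands.filter (fun c => passesB c primes)

-- ===== PRECONDITION & SPEC =====
def Spec_find_prime_q (n : Int) (out : List Int) : Prop := out = find_prime_q_alt n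
instance (n : Int) (out : List Int) : Decidable (Spec_find_prime_q n out) := by unfold Spec_find_prime_q; infer_instance

-- ===== CLAIM (what is proved, stated in full; the proofs are below) =====
def Claim_equal_find_prime_q : Prop := ∀ (n : Int), Dom_find_prime_q n → Spec_find_prime_q n (find_prime_q n)

-- ===== LEMMAS AND PROOFS =====

-- "c has no divisor d with 2 <= d and d*d <= c": the common characterisation of both tests
def NoSmallDiv (c : Int) : Prop := ∀ d : Int, 2 ≤ d → d * d ≤ c → ¬ d ∣ c

theorem isqrtLoopB_spec (c : Int) : ∀ (fuel : Nat) (r : Int), 1 ≤ r → r * r ≤ c →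
    (c - r).toNat ≤ fuel →
    1 ≤ isqrtLoopB c fuel r ∧ isqrtLoopB c fuel r * isqrtLoopB c fuel r ≤ c ∧
      c < (isqrtLoopB c fuel r + 1) * (isqrtLoopB c fuel r + 1) := by
  intro fuel
  induction fuel with
  | zero =>
    intro r hr hrr hfuel
    simp only [isqrtLoopB]
    have hcr : c ≤ r := by omega
    refine ⟨hr, hrr, by nlinarith⟩
  | succ fuel ih =>
    intro r hr hrr hfuel
    simp only [isqrtLoopB]
    by_cases h : (r + 1) * (r + 1) ≤ c
    · rw [if_pos h]
      have hrc : r + 1 ≤ c := by nlinarith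
      exact ih (r + 1) (by omega) h (by omega)
    · rw [if_neg h]
      exact ⟨hr, hrr, by omega⟩

theorem isPrimeLoopA_iff (num : Int) : ∀ (fuel : Nat) (i : Int),
    5 ≤ num → ¬ (2:Int) ∣ num → ¬ (3:Int) ∣ num →
    5 ≤ i → i % 6 = 5 → (num - i).toNat ≤ fuel →
    (∀ d : Int, 2 ≤ d → d < i → d * d ≤ num → ¬ d ∣ num) →
    (isPrimeLoopA num fuel i = true ↔ NoSmallDiv num) := by
  intro fuel
  induction fuel with
  | zero =>
    intro i hnum h2 h3 hi h6 hfuel hbelow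
    have hni : num ≤ i := by omega
    simp only [isPrimeLoopA, true_iff]
    intro d hd hdd hdvd
    by_cases hdi : d < i
    · exact hbelow d hd hdi hdd hdvd
    · push_neg at hdi; nlinarith
  | succ fuel ih =>
    intro i hnum h2 h3 hi h6 hfuel hbelow
    simp only [isPrimeLoopA]
    by_cases h : i * i ≤ num
    · rw [if_pos h]
      by_cases hm : (PySem.Int.mod num i == 0 || PySem.Int.mod num (i + 2) == 0) = true
      · -- the loop found a divisor i or i+2: result False, and NoSmallDiv fails
        rw [if_pos hm]
        simp only [Bool.or_eq_true, beq_iff_eq, PySem.Int.mod_eq_zero_iff_dvd] at hm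
        simp only [Bool.false_eq_true, false_iff]
        intro hns
        rcases hm with hm | hm
        · exact hns i (by omega) h hm
        · by_cases hbig : (i + 2) * (i + 2) ≤ num
          · exact hns (i + 2) (by omega) hbig hm
          · -- (i+2)^2 > num: the cofactor e = num / (i+2) is a small divisor instead
            push_neg at hbig
            obtain ⟨e, he⟩ := hm
            have he2 : 2 ≤ e := by nlinarith
            have hee : e * e ≤ num := by nlinarith
            exact hns e he2 hee ⟨i + 2, by linarith [he]⟩
      · rw [if_neg hm]
        have hmi : ¬ (i:Int) ∣ num := by
          intro hd
          rw [← PySem.Int.mod_eq_zero_iff_dvd] at hd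
          simp [hd] at hm
        have hmi2 : ¬ (i + 2) ∣ num := by
          intro hd
          rw [← PySem.Int.mod_eq_zero_iff_dvd] at hd
          simp [hd] at hm
        have hlt : i < num := by nlinarith
        refine ih (i + 6) hnum h2 h3 (by omega) (by omega) (by omega) ?_
        intro d hd hdlt hdd hdvd
        by_cases hlo : d < i
        · exact hbelow d hd hlo hdd hdvd
        · push_neg at hlo
          rcases (by omega : d = i ∨ d = i + 1 ∨ d = i + 2 ∨ d = i + 3 ∨ d = i + 4 ∨ d = i + 5)
            with rfl | rfl | rfl | rfl | rfl | rfl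
          · exact hmi hdvd
          · exact h2 (dvd_trans ((Int.dvd_iff_emod_eq_zero).mpr (by omega)) hdvd)
          · exact hmi2 hdvd
          · exact h2 (dvd_trans ((Int.dvd_iff_emod_eq_zero).mpr (by omega)) hdvd)
          · exact h3 (dvd_trans ((Int.dvd_iff_emod_eq_zero).mpr (by omega)) hdvd)
          · exact h2 (dvd_trans ((Int.dvd_iff_emod_eq_zero).mpr (by omega)) hdvd)
    · rw [if_neg h]
      push_neg at h
      simp only [true_iff]
      intro d hd hdd hdvd
      by_cases hdi : d < i
      · exact hbelow d hd hdi hdd hdvd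
      · push_neg at hdi; nlinarith

theorem is_prime_iff (num : Int) : is_prime num = true ↔ (2 ≤ num ∧ NoSmallDiv num) := by
  unfold is_prime
  by_cases hle1 : num ≤ 1
  · simp only [if_pos hle1, Bool.false_eq_true, false_iff]
    rintro ⟨h2c, -⟩; omega
  · rw [if_neg hle1]
    push_neg at hle1
    by_cases hle3 : num ≤ 3
    · rw [if_pos hle3]
      constructor
      · intro _; exact ⟨by omega, fun d hd hdd hdvd => by nlinarith⟩
      · intro _; rfl
    · rw [if_neg hle3]
      push_neg at hle3
      cases hm : (PySem.Int.mod num 2 == 0 || PySem.Int.mod num 3 == 0) with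
      | true =>
        rw [if_pos rfl]
        simp only [Bool.false_eq_true, false_iff]
        simp only [Bool.or_eq_true, beq_iff_eq, PySem.Int.mod_eq_zero_iff_dvd] at hm
        rintro ⟨-, hns⟩
        rcases hm with hm | hm
        · exact hns 2 le_rfl (by omega) hm
        · by_cases h2d : (2:Int) ∣ num
          · exact hns 2 le_rfl (by omega) h2d
          · have h9 : 9 ≤ num := by omega
            exact hns 3 (by omega) (by omega) hm
      | false =>
        rw [if_neg (by simp : ¬ ((false : Bool) = true))]
        have h2 : ¬ (2:Int) ∣ num := by
          rw [← PySem.Int.mod_eq_zero_iff_dvd]; intro h0; rw [h0] at hm; simp at hm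
        have h3 : ¬ (3:Int) ∣ num := by
          rw [← PySem.Int.mod_eq_zero_iff_dvd]; intro h0; rw [h0] at hm; simp at hm
        rw [isPrimeLoopA_iff num (num - 5).toNat 5 (by omega) h2 h3 le_rfl (by decide) (by omega)
            (fun d hd hdlt hdd hdvd => by
              rcases (by omega : d = 2 ∨ d = 3 ∨ d = 4) with rfl | rfl | rfl
              · exact h2 hdvd
              · exact h3 hdvd
              · exact h2 ((by decide : (2:Int) ∣ 4).trans hdvd))]
        constructor
        · intro hns; exact ⟨by omega, hns⟩
        · exact fun hp => hp.2

theorem findLoopA_spec (n : Int) : ∀ (fuel : Nat) (k : Int) (L : List Int),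
    1 ≤ k → (20 - k).toNat ≤ fuel →
    findLoopA n fuel k L =
      L ++ ((PySem.List.pyRange k 20 1).map (fun j => j * n + 1)).filter
        (fun c => is_prime c) := by
  intro fuel
  induction fuel with
  | zero =>
    intro k L hk hfuel
    rw [PySem.List.pyRange_one_eq_nil (by omega)]
    simp [findLoopA]
  | succ fuel ih =>
    intro k L hk hfuel
    simp only [findLoopA]
    by_cases h : k < 20
    · rw [if_pos h]
      rw [ih (k + 1) _ (by omega) (by omega), PySem.List.pyRange_one_cons h]
      simp only [List.map_cons, List.filter_cons]
      cases hp : is_prime (k * n + 1) with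
      | true => simp
      | false => simp
    · rw [if_neg h]
      rw [PySem.List.pyRange_one_eq_nil (by omega)]
      simp

-- B-side: reading one cell after a fold of `set … false` over a list of indices
theorem foldl_set_getD (L : List Int) : ∀ (fl : List Bool) (j : Nat),
    (L.foldl (fun f x => f.set x.toNat false) fl).getD j false
      = (fl.getD j false && !(L.any (fun x => x.toNat == j))) := by
  induction L with
  | nil => intro fl j; simp
  | cons x L ih =>
    intro fl j
    simp only [List.foldl_cons, List.any_cons, ih, Bool.not_or, ← Bool.and_assoc]
    congr 1
    by_cases hx : x.toNat = j
    · subst hx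
      simp only [beq_self_eq_true, Bool.not_true, Bool.and_false]
      simp only [List.getD, List.getElem?_set]
      by_cases hlen : x.toNat < fl.length
      · simp [hlen]
      · simp [hlen]
    · have : (x.toNat == j) = false := by simp [hx]
      simp only [this, Bool.not_false, Bool.and_true]
      simp [List.getD, hx]

theorem foldl_sieveInner_getD (r : Int) (I : List Int) : ∀ (fl : List Bool) (j : Nat),
    (I.foldl (fun f i => sieveInnerB r i f) fl).getD j false
      = (fl.getD j false &&
          !(I.any (fun i => (PySem.List.pyRange (i * i) (r + 1) i).any (fun x => x.toNat == j)))) := by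
  induction I with
  | nil => intro fl j; simp
  | cons i I ih =>
    intro fl j
    simp only [List.foldl_cons, List.any_cons, ih, Bool.not_or, ← Bool.and_assoc]
    congr 1
    exact foldl_set_getD _ fl j

theorem sieveB_getD_iff (r : Int) (j : Nat) (hj : (j : Int) ≤ r) :
    ((sieveB r).getD j false = true ↔ NoSmallDiv (j : Int)) := by
  unfold sieveB
  rw [foldl_sieveInner_getD]
  have hrep : (List.replicate (r + 1).toNat true).getD j false = true := by
    have hjlt : j < (r + 1).toNat := by omega
    simp [List.getD, hjlt]
  rw [hrep]
  simp only [Bool.true_and]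
  rw [Bool.not_eq_true', List.any_eq_false]
  constructor
  · -- no (i, multiple) pair hits j  →  j has no small divisor
    intro hall d hd hdd hdvd
    have hdr : d ≤ r := by nlinarith
    have hmem : d ∈ PySem.List.pyRange 2 (r + 1) 1 := by
      rw [PySem.List.mem_pyRange_one]; omega
    have hjmem : (j : Int) ∈ PySem.List.pyRange (d * d) (r + 1) d := by
      rw [PySem.List.mem_pyRange_iff_of_pos (by omega)]
      refine ⟨hdd, by omega, ?_⟩
      exact dvd_sub hdvd (Dvd.intro d rfl)
    apply hall d hmem
    rw [List.any_eq_true]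
    exact ⟨(j : Int), hjmem, by simp⟩
  · -- j has no small divisor  →  no crossing hits j
    intro hns i hi
    rw [List.any_eq_true]
    rintro ⟨x, hx, hxj⟩
    rw [PySem.List.mem_pyRange_one] at hi
    rw [PySem.List.mem_pyRange_iff_of_pos (by omega)] at hx
    obtain ⟨hx1, hx2, hx3⟩ := hx
    have hxnn : 0 ≤ x := by nlinarith
    have hdvdx : i ∣ x := by
      have : i ∣ (x - i * i) + i * i := dvd_add hx3 (Dvd.intro i rfl)
      simpa using this
    have hxe : x = (j : Int) := by
      rw [beq_iff_eq] at hxj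
      omega
    exact hns i (by omega) (hxe ▸ hx1) (hxe ▸ hdvdx)

theorem mem_sievePrimes (r p : Int) :
    p ∈ sievePrimesB r (sieveB r) ↔ (2 ≤ p ∧ p ≤ r ∧ NoSmallDiv p) := by
  unfold sievePrimesB
  rw [List.mem_filter, PySem.List.mem_pyRange_one]
  constructor
  · rintro ⟨⟨h2, hr⟩, hflag⟩
    have hcast : ((p.toNat : Int)) = p := Int.toNat_of_nonneg (by omega)
    have := (sieveB_getD_iff r p.toNat (by omega)).mp hflag
    rw [hcast] at this
    exact ⟨h2, by omega, this⟩
  · rintro ⟨h2, hr, hns⟩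
    have hcast : ((p.toNat : Int)) = p := Int.toNat_of_nonneg (by omega)
    refine ⟨⟨h2, by omega⟩, ?_⟩
    rw [sieveB_getD_iff r p.toNat (by omega), hcast]
    exact hns

theorem pairwise_sievePrimes (r : Int) : (sievePrimesB r (sieveB r)).Pairwise (· < ·) :=
  List.Pairwise.filter _ (PySem.List.pairwise_lt_pyRange_one 2 (r + 1))

-- every small divisor yields a small divisor that itself has no small divisor (a prime)
theorem exists_nsd_divisor (c : Int) : ∀ (m : Nat) (d : Int), d.toNat ≤ m →
    2 ≤ d → d * d ≤ c → d ∣ c →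
    ∃ p : Int, 2 ≤ p ∧ p * p ≤ c ∧ p ∣ c ∧ NoSmallDiv p := by
  intro m
  induction m with
  | zero => intro d hm hd _ _; omega
  | succ m ih =>
    intro d hm hd hdd hdvd
    by_cases hn : NoSmallDiv d
    · exact ⟨d, hd, hdd, hdvd, hn⟩
    · unfold NoSmallDiv at hn
      push_neg at hn
      obtain ⟨e, he2, hee, hedvd⟩ := hn
      have hed : e < d := by nlinarith
      refine ih e (by omega) he2 (by nlinarith) (hedvd.trans hdvd)

theorem passesB_true_of_nsd (c : Int) (hns : NoSmallDiv c) : ∀ (l : List Int),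
    (∀ p ∈ l, 2 ≤ p) → passesB c l = true := by
  intro l
  induction l with
  | nil => intro _; rfl
  | cons p ps ih =>
    intro hall
    simp only [passesB]
    by_cases h : p * p > c
    · rw [if_pos h]
    · rw [if_neg h]
      have hp2 : 2 ≤ p := hall p (List.mem_cons_self)
      have : ¬ p ∣ c := hns p hp2 (by omega)
      rw [if_neg (by simpa [PySem.Int.mod_eq_zero_iff_dvd] using this)]
      exact ih (fun q hq => hall q (List.mem_cons_of_mem _ hq))

theorem passesB_false_of_mem (c p : Int) (hp2 : 2 ≤ p) (hpp : p * p ≤ c) (hpdvd : p ∣ c) :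
    ∀ (l : List Int), l.Pairwise (· < ·) → (∀ q ∈ l, 2 ≤ q) → p ∈ l →
    passesB c l = false := by
  intro l
  induction l with
  | nil => intro _ _ h; simp at h
  | cons q qs ih =>
    intro hpw hall hmem
    rw [List.pairwise_cons] at hpw
    simp only [passesB]
    rcases List.mem_cons.mp hmem with rfl | hmem'
    · rw [if_neg (by omega), if_pos (by simpa [PySem.Int.mod_eq_zero_iff_dvd] using hpdvd)]
    · have hq2 : 2 ≤ q := hall q (List.mem_cons_self)
      have hqp : q < p := hpw.1 p hmem'
      have hqq : ¬ q * q > c := by nlinarith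
      rw [if_neg hqq]
      by_cases hqd : PySem.Int.mod c q == 0
      · rw [if_pos hqd]
      · rw [if_neg hqd]
        exact ih hpw.2 (fun x hx => hall x (List.mem_cons_of_mem _ hx)) hmem'

theorem passesB_iff (c limit r : Int) (hcl : c ≤ limit)
    (hr1 : 1 ≤ r) (hr : limit < (r + 1) * (r + 1)) :
    (passesB c (sievePrimesB r (sieveB r)) = true ↔ NoSmallDiv c) := by
  constructor
  · intro hpass
    intro d hd hdd hdvd
    obtain ⟨p, hp2, hpp, hpdvd, hpns⟩ :=
      exists_nsd_divisor c d.toNat d le_rfl hd hdd hdvd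
    have hpr : p ≤ r := by
      by_contra hcon
      have h1 : r + 1 ≤ p := by omega
      nlinarith
    have hmem : p ∈ sievePrimesB r (sieveB r) := (mem_sievePrimes r p).mpr ⟨hp2, hpr, hpns⟩
    have := passesB_false_of_mem c p hp2 hpp hpdvd _ (pairwise_sievePrimes r)
      (fun q hq => ((mem_sievePrimes r q).mp hq).1) hmem
    rw [this] at hpass
    exact absurd hpass (by simp)
  · intro hns
    exact passesB_true_of_nsd c hns _ (fun q hq => ((mem_sievePrimes r q).mp hq).1)

-- ===== VERDICT (by name: the statement is the Claim_ definition above) =====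
theorem find_prime_q_spec : Claim_equal_find_prime_q := by
  intro n _
  show find_prime_q n = find_prime_q_alt n
  unfold find_prime_q find_prime_q_alt
  rw [findLoopA_spec n 19 1 [] le_rfl (by omega)]
  simp only [List.nil_append]
  set cands := (PySem.List.pyRange 1 20 1).map (fun k => k * n + 1) with hcands
  cases hmax : PySem.List.max? cands (fun x => x) with
  | none =>
    rw [PySem.List.max?_eq_none_iff] at hmax
    rw [hcands] at hmax
    simp only [List.map_eq_nil_iff] at hmax
    exact absurd hmax (by decide)
  | some limit =>
    have hmem19 : (19 * n + 1) ∈ cands := by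
      rw [hcands, List.mem_map]
      exact ⟨19, by rw [PySem.List.mem_pyRange_one]; omega, rfl⟩
    have hub : ∀ c ∈ cands, c ≤ limit := fun c hc => PySem.List.max?_isMax hmax c hc
    by_cases hn : 1 ≤ n
    · -- main case: every candidate is ≥ 2 and ≤ limit = max
      have hlimit2 : ¬ limit < 2 := by
        have := hub _ hmem19
        omega
      obtain ⟨hr1, hr2, hr3⟩ :=
        isqrtLoopB_spec limit (limit - 1).toNat 1 le_rfl (by omega) (by omega)
      set r := isqrtLoopB limit (limit - 1).toNat 1 with hrdef
      dsimp only
      rw [if_neg hlimit2]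
      apply List.filter_congr
      intro c hc
      obtain ⟨k, hk, rfl⟩ := by rw [hcands] at hc; exact List.mem_map.mp hc
      rw [PySem.List.mem_pyRange_one] at hk
      have hc2 : 2 ≤ k * n + 1 := by nlinarith
      have hcl : k * n + 1 ≤ limit := hub _ hc
      rw [Bool.eq_iff_iff, is_prime_iff, passesB_iff (k * n + 1) limit r hcl hr1 hr3]
      constructor
      · exact fun h => h.2
      · exact fun h => ⟨hc2, h⟩
    · -- n ≤ 0: max candidate ≤ 1, B returns [], A's filter keeps nothing
      have hlimit : limit < 2 := by
        have hmem := PySem.List.max?_mem hmax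
        obtain ⟨k, hk, hke⟩ := by rw [hcands] at hmem; exact List.mem_map.mp hmem
        rw [PySem.List.mem_pyRange_one] at hk
        nlinarith
      dsimp only
      rw [if_pos hlimit]
      rw [List.filter_eq_nil_iff]
      intro c hc
      have hcle : c ≤ limit := hub c hc
      rw [is_prime_iff]
      rintro ⟨h2, -⟩
      omega
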